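-- pv_equiv track=rewrite | github.com/mehmetydm/pytthon-experimental | StringsAndArrays/main.py | isStringAnagram
-- ===== SOURCE A (Python) =====
-- def isStringAnagram(s1, s2):
--     str1Dict = dict()
--     str2Dict = dict()
--
--     if s1 == s2 or len(s1) != len(s2):
--         return False
--     for c in s1:
--         if c not in str1Dict:
--             str1Dict[c] = 1
--         else:
--             str1Dict[c] = str1Dict[c] + 1
--     for c in s2:
--         if c not in str2Dict:
--             str2Dict[c] = 1
--         else:
--             str2Dict[c] = str2Dict[c] + 1
--
--     return str1Dict == str2Dict
-- ===== SOURCE B (Python) =====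
-- def isStringAnagram(s1, s2):
--     if s1 == s2 or len(s1) != len(s2):
--         return False
--     return sorted(s1) == sorted(s2)
-- ===== Notes on version B (the rewrite author's own statement) =====
-- stated objective: idiomatic
-- what changed: Replaces the two frequency-dictionary-building loops and dict comparison with a single sort-and-compare (sorted(s1) == sorted(s2)), keeping the original equal/length guard.
import Mathlib
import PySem

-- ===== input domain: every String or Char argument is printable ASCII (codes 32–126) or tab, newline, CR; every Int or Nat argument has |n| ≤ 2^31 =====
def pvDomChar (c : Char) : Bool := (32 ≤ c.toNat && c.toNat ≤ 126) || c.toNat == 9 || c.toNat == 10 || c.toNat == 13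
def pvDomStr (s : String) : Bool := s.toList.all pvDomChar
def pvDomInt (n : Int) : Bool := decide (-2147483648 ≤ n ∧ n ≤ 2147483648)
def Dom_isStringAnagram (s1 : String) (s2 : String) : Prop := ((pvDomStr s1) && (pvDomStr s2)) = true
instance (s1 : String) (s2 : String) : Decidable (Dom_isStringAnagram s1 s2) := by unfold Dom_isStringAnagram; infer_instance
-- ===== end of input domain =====

-- B replaces A's two counting loops and dict comparison with a sort-and-compare, keeping A's guard; objective: idiomatic.

-- ===== PORT A =====
-- Python dict == ignores insertion order: same key set, same value at every key.
def pyDictEq (d1 d2 : PySem.Dict Char Int) : Bool :=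
  PySem.Set.equal d1.keys d2.keys && d1.keys.all (fun k => d1.get? k == d2.get? k)

def isStringAnagram (s1 : String) (s2 : String) : Bool :=
  if s1 == s2 || PySem.Str.len s1 != PySem.Str.len s2 then false
  else
    let str1Dict := s1.toList.foldl
      (fun d c => if !d.contains c then d.insert c 1 else d.insert c (d.getD c 0 + 1))
      (PySem.Dict.empty : PySem.Dict Char Int)
    let str2Dict := s2.toList.foldl
      (fun d c => if !d.contains c then d.insert c 1 else d.insert c (d.getD c 0 + 1))
      (PySem.Dict.empty : PySem.Dict Char Int)
    pyDictEq str1Dict str2Dict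

-- ===== PORT B =====
def isStringAnagram_alt (s1 : String) (s2 : String) : Bool :=
  if s1 == s2 || PySem.Str.len s1 != PySem.Str.len s2 then false
  else decide (PySem.List.sorted s1.toList (fun x => x) false
             = PySem.List.sorted s2.toList (fun x => x) false)

-- ===== PRECONDITION & SPEC =====
def Spec_isStringAnagram (s1 : String) (s2 : String) (out : Bool) : Prop := out = isStringAnagram_alt s1 s2
instance (s1 : String) (s2 : String) (out : Bool) : Decidable (Spec_isStringAnagram s1 s2 out) := by unfold Spec_isStringAnagram; infer_instance

-- ===== CLAIM (what is proved, stated in full; the proofs are below) =====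
def Claim_equal_isStringAnagram : Prop := ∀ (s1 : String) (s2 : String), Dom_isStringAnagram s1 s2 → Spec_isStringAnagram s1 s2 (isStringAnagram s1 s2)

-- ===== LEMMAS AND PROOFS =====

-- A's counting loop builds Counter(s).
theorem loop_eq_counter (l : List Char) :
    l.foldl (fun d c => if !d.contains c then d.insert c 1 else d.insert c (d.getD c 0 + 1))
      (PySem.Dict.empty : PySem.Dict Char Int) = PySem.Dict.counter l := by
  rw [← PySem.Dict.foldl_insert_getD_add_one_eq_counter]
  apply PySem.List.foldl_congr_mem
  intro d c _
  by_cases h : d.contains c = true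
  · simp [h]
  · simp only [Bool.not_eq_true] at h
    simp [h, PySem.Dict.getD_of_not_contains]

theorem get?_counter_of_mem {l : List Char} {c : Char} (h : c ∈ l) :
    (PySem.Dict.counter l).get? c = some (l.count c : Int) := by
  have hc : (PySem.Dict.counter l).contains c = true := by
    simp [PySem.Dict.contains_counter, h]
  have hs := PySem.Dict.contains_eq_isSome_get? (d := PySem.Dict.counter l) (k := c)
  rw [hc] at hs
  obtain ⟨v, hv⟩ := Option.isSome_iff_exists.mp hs.symm
  have h2 := PySem.Dict.getD_eq_get?_getD (d := PySem.Dict.counter l) (k := c) (d0 := (0 : Int))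
  rw [hv, PySem.Dict.getD_counter] at h2
  simp only [Option.getD_some] at h2
  rw [hv, ← h2]

theorem pyDictEq_counter_iff (l1 l2 : List Char) :
    pyDictEq (PySem.Dict.counter l1) (PySem.Dict.counter l2) = true ↔ l1.Perm l2 := by
  unfold pyDictEq
  rw [Bool.and_eq_true, List.all_eq_true, PySem.Set.equal_iff]
  simp only [PySem.Dict.keys_counter]
  constructor
  · rintro ⟨hk, hv⟩
    rw [List.perm_iff_count]
    intro c
    by_cases h1 : c ∈ l1
    · have hm1 : c ∈ PySem.Set.ofList l1 := by simp [PySem.Set.mem_ofList, h1]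
      have h2 : c ∈ l2 := by
        have := (hk c).mp hm1
        simpa [PySem.Set.mem_ofList] using this
      have hcnt := hv c hm1
      rw [get?_counter_of_mem h1, get?_counter_of_mem h2] at hcnt
      simp only [beq_iff_eq, Option.some.injEq, Int.natCast_inj] at hcnt
      exact hcnt
    · by_cases h2 : c ∈ l2
      · exfalso
        apply h1
        have hm2 : c ∈ PySem.Set.ofList l2 := by simp [PySem.Set.mem_ofList, h2]
        simpa [PySem.Set.mem_ofList] using (hk c).mpr hm2
      · simp [List.count_eq_zero_of_not_mem h1, List.count_eq_zero_of_not_mem h2]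
  · intro hp
    refine ⟨fun x => ?_, fun c hc => ?_⟩
    · simp [PySem.Set.mem_ofList, hp.mem_iff]
    · have h1 : c ∈ l1 := by simpa [PySem.Set.mem_ofList] using hc
      have h2 : c ∈ l2 := hp.mem_iff.mp h1
      rw [get?_counter_of_mem h1, get?_counter_of_mem h2, hp.count_eq]
      simp

-- ===== VERDICT (by name: the statement is the Claim_ definition above) =====
theorem isStringAnagram_spec : Claim_equal_isStringAnagram := by
  intro s1 s2 _
  unfold Spec_isStringAnagram isStringAnagram isStringAnagram_alt
  cases hg : (s1 == s2 || PySem.Str.len s1 != PySem.Str.len s2) with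
  | true => rfl
  | false =>
    simp only [Bool.false_eq_true, if_false, loop_eq_counter]
    rw [Bool.eq_iff_iff, pyDictEq_counter_iff, decide_eq_true_eq,
      PySem.List.sorted_id_eq_sorted_id_iff_perm]
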